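-- pv_equiv track=rewrite | github.com/kecheste/numina-restapi | app/services/result_calculation/soul_compass.py | compute_soul_compass
-- ===== SOURCE A (Python) =====
-- from typing import Any
--
-- def compute_soul_compass(answers: list[Any] | dict[str, Any]) -> dict[str, str]:
--     """
--     Stub/synthesis: from selected questions (values, motivations, fears, long-term desires)
--     produce compact JSON for narrative. Returns coreDrive, directionTheme, growthFocus, shadowPattern.
--     In production this can be an LLM extractor over raw answers; here we return structure from answers.
--     """
--     if isinstance(answers, dict):
--         # Flatten for simple keyword scan
--         text_parts = []
--         for v in answers.values():
--             if isinstance(v, str):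
--                 text_parts.append(v)
--             elif isinstance(v, list):
--                 text_parts.extend(str(x) for x in v)
--         combined = " ".join(text_parts)
--     else:
--         combined = " ".join(
--             str(a.get("answer", a) if isinstance(a, dict) else a) for a in (answers or [])
--         ).lower()
--
--     # Stub: derive simple themes from presence of keywords (can be replaced by LLM extractor)
--     core_drive = _infer_core_drive(combined)
--     direction_theme = _infer_direction_theme(combined)
--     growth_focus = _infer_growth_focus(combined)
--     shadow_pattern = _infer_shadow_pattern(combined)
--
--     return {
--         "coreDrive": core_drive,
--         "directionTheme": direction_theme,
--         "growthFocus": growth_focus,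
--         "shadowPattern": shadow_pattern,
--     }
--
-- def _infer_core_drive(text: str) -> str:
--     if "creat" in text or "express" in text or "art" in text:
--         return "Creative expression and authenticity"
--     if "help" in text or "service" in text or "other" in text:
--         return "Service and connection with others"
--     if "growth" in text or "learn" in text or "understand" in text:
--         return "Growth and understanding"
--     if "freedom" in text or "free" in text or "independ" in text:
--         return "Freedom and independence"
--     if "peace" in text or "balance" in text or "harmony" in text:
--         return "Peace and balance"
--     return "Purpose and meaning"
--
-- def _infer_direction_theme(text: str) -> str:
--     if "spirit" in text or "soul" in text or "higher" in text:
--         return "Spiritual alignment"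
--     if "relation" in text or "love" in text or "connect" in text:
--         return "Relationship and belonging"
--     if "career" in text or "work" in text or "calling" in text:
--         return "Vocation and impact"
--     if "heal" in text or "past" in text or "inner" in text:
--         return "Healing and integration"
--     return "Integration of inner and outer life"
--
-- def _infer_growth_focus(text: str) -> str:
--     if "fear" in text or "anxiety" in text or "worry" in text:
--         return "Working with fear and uncertainty"
--     if "self-worth" in text or "worth" in text or "enough" in text:
--         return "Self-worth and self-acceptance"
--     if "boundary" in text or "say no" in text or "people-pleas" in text:
--         return "Boundaries and saying no"
--     if "trust" in text or "control" in text or "let go" in text: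
--         return "Trust and letting go"
--     return "Integrating shadow and light"
--
-- def _infer_shadow_pattern(text: str) -> str:
--     if "perfection" in text or "perfect" in text or "never enough" in text:
--         return "Perfectionism and self-criticism"
--     if "avoid" in text or "escape" in text or "numb" in text:
--         return "Avoidance and numbing"
--     if "control" in text or "need to control" in text:
--         return "Over-control and rigidity"
--     if "please" in text or "approval" in text or "rejection" in text:
--         return "People-pleasing and approval-seeking"
--     return "Unconscious patterns seeking integration"
-- ===== SOURCE B (Python) =====
-- # Two-stage rewrite: one pass precomputes the set of ALL keywords occurring in
-- # the text; each category is then resolved without any substring test, by a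
-- # reverse fold over its rules where a later write (earlier rule) overwrites.
--
-- CATEGORIES = [
--     ("coreDrive", [
--         (["creat", "express", "art"], "Creative expression and authenticity"),
--         (["help", "service", "other"], "Service and connection with others"),
--         (["growth", "learn", "understand"], "Growth and understanding"),
--         (["freedom", "free", "independ"], "Freedom and independence"),
--         (["peace", "balance", "harmony"], "Peace and balance"),
--     ], "Purpose and meaning"),
--     ("directionTheme", [
--         (["spirit", "soul", "higher"], "Spiritual alignment"),
--         (["relation", "love", "connect"], "Relationship and belonging"),
--         (["career", "work", "calling"], "Vocation and impact"),
--         (["heal", "past", "inner"], "Healing and integration"),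
--     ], "Integration of inner and outer life"),
--     ("growthFocus", [
--         (["fear", "anxiety", "worry"], "Working with fear and uncertainty"),
--         (["self-worth", "worth", "enough"], "Self-worth and self-acceptance"),
--         (["boundary", "say no", "people-pleas"], "Boundaries and saying no"),
--         (["trust", "control", "let go"], "Trust and letting go"),
--     ], "Integrating shadow and light"),
--     ("shadowPattern", [
--         (["perfection", "perfect", "never enough"], "Perfectionism and self-criticism"),
--         (["avoid", "escape", "numb"], "Avoidance and numbing"),
--         (["control", "need to control"], "Over-control and rigidity"),
--         (["please", "approval", "rejection"], "People-pleasing and approval-seeking"),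
--     ], "Unconscious patterns seeking integration"),
-- ]
--
-- _ALL_KEYWORDS = frozenset(k for _, rules, _ in CATEGORIES for kws, _ in rules for k in kws)
--
--
-- def _resolve(hits, rules, default):
--     val = default
--     for kws, res in reversed(rules):
--         if not hits.isdisjoint(kws):
--             val = res
--     return val
--
--
-- def compute_soul_compass(answers):
--     if isinstance(answers, dict):
--         text_parts = []
--         for v in answers.values():
--             if isinstance(v, str):
--                 text_parts.append(v)
--             elif isinstance(v, list):
--                 text_parts.extend(str(x) for x in v)
--         combined = " ".join(text_parts)
--     else:
--         combined = " ".join(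
--             str(a.get("answer", a) if isinstance(a, dict) else a) for a in (answers or [])
--         ).lower()
--     hits = {k for k in _ALL_KEYWORDS if k in combined}
--     return {name: _resolve(hits, rules, default) for name, rules, default in CATEGORIES}
-- ===== Notes on version B (the rewrite author's own statement) =====
-- stated objective: alternative
-- what changed: B first builds, in one pass, the set of all keywords occurring in the combined text, then resolves each category with no substring tests at all, by folding its rules in reverse with a last-write-wins accumulator instead of A's early-return if-chains.
import Mathlib
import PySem

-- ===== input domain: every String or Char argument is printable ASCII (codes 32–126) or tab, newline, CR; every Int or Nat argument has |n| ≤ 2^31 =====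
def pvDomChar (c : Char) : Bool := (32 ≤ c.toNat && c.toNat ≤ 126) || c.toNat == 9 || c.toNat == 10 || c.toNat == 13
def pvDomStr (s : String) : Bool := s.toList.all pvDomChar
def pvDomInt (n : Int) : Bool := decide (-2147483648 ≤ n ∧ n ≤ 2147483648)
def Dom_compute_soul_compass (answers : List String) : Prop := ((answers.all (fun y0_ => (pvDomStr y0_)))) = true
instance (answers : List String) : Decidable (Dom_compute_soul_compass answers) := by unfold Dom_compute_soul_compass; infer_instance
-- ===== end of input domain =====

-- B stages the work: one pass computes the set of keywords present in the text, then each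
-- category is resolved with no substring tests, by a reverse overwrite-fold over its rules (simpler decomposition).

-- ===== PORT A =====
def infer_core_drive (text : String) : String :=
  if (PySem.Str.isIn "creat" text || PySem.Str.isIn "express" text || PySem.Str.isIn "art" text) then
    "Creative expression and authenticity"
  else if (PySem.Str.isIn "help" text || PySem.Str.isIn "service" text || PySem.Str.isIn "other" text) then
    "Service and connection with others"
  else if (PySem.Str.isIn "growth" text || PySem.Str.isIn "learn" text || PySem.Str.isIn "understand" text) then
    "Growth and understanding"
  else if (PySem.Str.isIn "freedom" text || PySem.Str.isIn "free" text || PySem.Str.isIn "independ" text) then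
    "Freedom and independence"
  else if (PySem.Str.isIn "peace" text || PySem.Str.isIn "balance" text || PySem.Str.isIn "harmony" text) then
    "Peace and balance"
  else "Purpose and meaning"

def infer_direction_theme (text : String) : String :=
  if (PySem.Str.isIn "spirit" text || PySem.Str.isIn "soul" text || PySem.Str.isIn "higher" text) then
    "Spiritual alignment"
  else if (PySem.Str.isIn "relation" text || PySem.Str.isIn "love" text || PySem.Str.isIn "connect" text) then
    "Relationship and belonging"
  else if (PySem.Str.isIn "career" text || PySem.Str.isIn "work" text || PySem.Str.isIn "calling" text) then
    "Vocation and impact"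
  else if (PySem.Str.isIn "heal" text || PySem.Str.isIn "past" text || PySem.Str.isIn "inner" text) then
    "Healing and integration"
  else "Integration of inner and outer life"

def infer_growth_focus (text : String) : String :=
  if (PySem.Str.isIn "fear" text || PySem.Str.isIn "anxiety" text || PySem.Str.isIn "worry" text) then
    "Working with fear and uncertainty"
  else if (PySem.Str.isIn "self-worth" text || PySem.Str.isIn "worth" text || PySem.Str.isIn "enough" text) then
    "Self-worth and self-acceptance"
  else if (PySem.Str.isIn "boundary" text || PySem.Str.isIn "say no" text || PySem.Str.isIn "people-pleas" text) then
    "Boundaries and saying no"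
  else if (PySem.Str.isIn "trust" text || PySem.Str.isIn "control" text || PySem.Str.isIn "let go" text) then
    "Trust and letting go"
  else "Integrating shadow and light"

def infer_shadow_pattern (text : String) : String :=
  if (PySem.Str.isIn "perfection" text || PySem.Str.isIn "perfect" text || PySem.Str.isIn "never enough" text) then
    "Perfectionism and self-criticism"
  else if (PySem.Str.isIn "avoid" text || PySem.Str.isIn "escape" text || PySem.Str.isIn "numb" text) then
    "Avoidance and numbing"
  else if (PySem.Str.isIn "control" text || PySem.Str.isIn "need to control" text) then
    "Over-control and rigidity"
  else if (PySem.Str.isIn "please" text || PySem.Str.isIn "approval" text || PySem.Str.isIn "rejection" text) then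
    "People-pleasing and approval-seeking"
  else "Unconscious patterns seeking integration"

-- On a list-of-strings input A takes the else branch: join with " " and lowercase
-- (str(a) = a for strings; 'answers or []' coincides with answers here since join [] = "").
def compute_soul_compass (answers : List String) : List (String × String) :=
  let combined := PySem.Str.lower (PySem.Str.join " " answers)
  [("coreDrive", infer_core_drive combined),
   ("directionTheme", infer_direction_theme combined),
   ("growthFocus", infer_growth_focus combined),
   ("shadowPattern", infer_shadow_pattern combined)]

-- ===== PORT B =====
-- _ALL_KEYWORDS: frozenset of every keyword (distinct elements; membership-only use, order immaterial)
def pvAllKeywords : List String :=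
  ["creat", "express", "art", "help", "service", "other", "growth", "learn", "understand",
   "freedom", "free", "independ", "peace", "balance", "harmony",
   "spirit", "soul", "higher", "relation", "love", "connect", "career", "work", "calling",
   "heal", "past", "inner",
   "fear", "anxiety", "worry", "self-worth", "worth", "enough", "boundary", "say no",
   "people-pleas", "trust", "control", "let go",
   "perfection", "perfect", "never enough", "avoid", "escape", "numb", "need to control",
   "please", "approval", "rejection"]

def pvCategories : List (String × List (List String × String) × String) :=
  [("coreDrive",
    [(["creat", "express", "art"], "Creative expression and authenticity"),
     (["help", "service", "other"], "Service and connection with others"),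
     (["growth", "learn", "understand"], "Growth and understanding"),
     (["freedom", "free", "independ"], "Freedom and independence"),
     (["peace", "balance", "harmony"], "Peace and balance")],
    "Purpose and meaning"),
   ("directionTheme",
    [(["spirit", "soul", "higher"], "Spiritual alignment"),
     (["relation", "love", "connect"], "Relationship and belonging"),
     (["career", "work", "calling"], "Vocation and impact"),
     (["heal", "past", "inner"], "Healing and integration")],
    "Integration of inner and outer life"),
   ("growthFocus",
    [(["fear", "anxiety", "worry"], "Working with fear and uncertainty"),
     (["self-worth", "worth", "enough"], "Self-worth and self-acceptance"),
     (["boundary", "say no", "people-pleas"], "Boundaries and saying no"),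
     (["trust", "control", "let go"], "Trust and letting go")],
    "Integrating shadow and light"),
   ("shadowPattern",
    [(["perfection", "perfect", "never enough"], "Perfectionism and self-criticism"),
     (["avoid", "escape", "numb"], "Avoidance and numbing"),
     (["control", "need to control"], "Over-control and rigidity"),
     (["please", "approval", "rejection"], "People-pleasing and approval-seeking")],
    "Unconscious patterns seeking integration")]

-- _resolve: val = default; for kws, res in reversed(rules): if not hits.isdisjoint(kws): val = res
-- ('not hits.isdisjoint(kws)' = some element of kws is in hits)
def pvResolve (hits : List String) (rules : List (List String × String)) (dflt : String) : String :=
  rules.reverse.foldl (fun val r => if r.1.any (fun k => hits.contains k) then r.2 else val) dflt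

def compute_soul_compass_alt (answers : List String) : List (String × String) :=
  let combined := PySem.Str.lower (PySem.Str.join " " answers)
  let hits := pvAllKeywords.filter (fun k => PySem.Str.isIn k combined)
  pvCategories.map (fun c => (c.1, pvResolve hits c.2.1 c.2.2))

-- ===== PRECONDITION & SPEC =====
def Spec_compute_soul_compass (answers : List String) (out : List (String × String)) : Prop := out = compute_soul_compass_alt answers
instance (answers : List String) (out : List (String × String)) : Decidable (Spec_compute_soul_compass answers out) := by unfold Spec_compute_soul_compass; infer_instance

-- ===== CLAIM (what is proved, stated in full; the proofs are below) =====
def Claim_equal_compute_soul_compass : Prop := ∀ (answers : List String), Dom_compute_soul_compass answers → Spec_compute_soul_compass answers (compute_soul_compass answers)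

-- ===== LEMMAS AND PROOFS =====
theorem contains_filter (l : List String) (p : String → Bool) (a : String) :
    (l.filter p).contains a = (l.contains a && p a) := by
  induction l with
  | nil => simp
  | cons x xs ih => by_cases h : p x <;> by_cases hax : a = x <;> simp [h, hax]

theorem resolve_core (t : String) :
    pvResolve (pvAllKeywords.filter (fun k => PySem.Str.isIn k t))
      [(["creat", "express", "art"], "Creative expression and authenticity"),
       (["help", "service", "other"], "Service and connection with others"),
       (["growth", "learn", "understand"], "Growth and understanding"),
       (["freedom", "free", "independ"], "Freedom and independence"),
       (["peace", "balance", "harmony"], "Peace and balance")]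
      "Purpose and meaning" = infer_core_drive t := by
  simp only [pvResolve, List.reverse_cons, List.reverse_nil, List.nil_append, List.cons_append,
    List.foldl_cons, List.foldl_nil, List.any_cons, List.any_nil,
    contains_filter, Bool.or_false, infer_core_drive]
  simp [pvAllKeywords, or_assoc]

theorem resolve_direction (t : String) :
    pvResolve (pvAllKeywords.filter (fun k => PySem.Str.isIn k t))
      [(["spirit", "soul", "higher"], "Spiritual alignment"),
       (["relation", "love", "connect"], "Relationship and belonging"),
       (["career", "work", "calling"], "Vocation and impact"),
       (["heal", "past", "inner"], "Healing and integration")]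
      "Integration of inner and outer life" = infer_direction_theme t := by
  simp only [pvResolve, List.reverse_cons, List.reverse_nil, List.nil_append, List.cons_append,
    List.foldl_cons, List.foldl_nil, List.any_cons, List.any_nil,
    contains_filter, Bool.or_false, infer_direction_theme]
  simp [pvAllKeywords, or_assoc]

theorem resolve_growth (t : String) :
    pvResolve (pvAllKeywords.filter (fun k => PySem.Str.isIn k t))
      [(["fear", "anxiety", "worry"], "Working with fear and uncertainty"),
       (["self-worth", "worth", "enough"], "Self-worth and self-acceptance"),
       (["boundary", "say no", "people-pleas"], "Boundaries and saying no"),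
       (["trust", "control", "let go"], "Trust and letting go")]
      "Integrating shadow and light" = infer_growth_focus t := by
  simp only [pvResolve, List.reverse_cons, List.reverse_nil, List.nil_append, List.cons_append,
    List.foldl_cons, List.foldl_nil, List.any_cons, List.any_nil,
    contains_filter, Bool.or_false, infer_growth_focus]
  simp [pvAllKeywords, or_assoc]

theorem resolve_shadow (t : String) :
    pvResolve (pvAllKeywords.filter (fun k => PySem.Str.isIn k t))
      [(["perfection", "perfect", "never enough"], "Perfectionism and self-criticism"),
       (["avoid", "escape", "numb"], "Avoidance and numbing"),
       (["control", "need to control"], "Over-control and rigidity"),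
       (["please", "approval", "rejection"], "People-pleasing and approval-seeking")]
      "Unconscious patterns seeking integration" = infer_shadow_pattern t := by
  simp only [pvResolve, List.reverse_cons, List.reverse_nil, List.nil_append, List.cons_append,
    List.foldl_cons, List.foldl_nil, List.any_cons, List.any_nil,
    contains_filter, Bool.or_false, infer_shadow_pattern]
  simp [pvAllKeywords, or_assoc]

-- ===== VERDICT (by name: the statement is the Claim_ definition above) =====
theorem compute_soul_compass_spec : Claim_equal_compute_soul_compass := by
  intro answers _
  unfold Spec_compute_soul_compass compute_soul_compass compute_soul_compass_alt pvCategories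
  simp only [List.map_cons, List.map_nil, resolve_core, resolve_direction, resolve_growth,
    resolve_shadow]
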